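-- pv_equiv track=rewrite | github.com/DavideBraga/master-degree-CS | masterDegree/FirstYear/SecondSemestr/ComplessitàAlgoritmi/rtal/resolved/arcobaleno/arcobaleno.py | arcobaleno
-- ===== SOURCE A (Python) =====
-- def arcobaleno(istanza, lenght):
--
--     if len(istanza) == 0:
--         return 0
--
--     if len(istanza) == 1:
--         return 1
--
--     colore = istanza[0]
--     index = 1
--
--     while index < lenght:
--         if colore == istanza[index]:
--             return 1 + arcobaleno(istanza[1:index], len(istanza[1:index])) + arcobaleno(istanza[index:], len(istanza[index:])) - 1
--         index += 1
--
--     return 1 + arcobaleno(istanza[1:], len(istanza[1:]))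
-- ===== SOURCE B (Python) =====
-- def arcobaleno(istanza, lenght):
--     n = len(istanza)
--     if n == 0:
--         return 0
--     if n == 1:
--         return 1
--     # nxt[j] = index of the next occurrence of istanza[j] after j, or None
--     nxt = []
--     last = {}
--     for j in range(n - 1, -1, -1):
--         c = istanza[j]
--         nxt.append(last.get(c))
--         last[c] = j
--     nxt.reverse()
--
--     def h(lo, hi):
--         # value of the recursion on the segment istanza[lo:hi], no slicing
--         length = hi - lo
--         if length <= 0:
--             return 0
--         if length == 1:
--             return 1
--         j = nxt[lo]
--         if j is not None and lo < j and j < hi: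
--             return h(lo + 1, j) + h(j, hi)
--         return 1 + h(lo + 1, hi)
--
--     j = nxt[0]
--     if j is not None and 0 < j and j < lenght:
--         return h(1, j) + h(j, n)
--     return 1 + h(1, n)
-- ===== Notes on version B (the rewrite author's own statement) =====
-- stated objective: faster
-- what changed: replaces A's slice-and-rescan recursion with an index-based recursion over (lo,hi) bounds driven by a next-same-character-position array precomputed in one right-to-left pass with a dict, so no string is ever copied and no inner scan is repeated
import Mathlib
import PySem

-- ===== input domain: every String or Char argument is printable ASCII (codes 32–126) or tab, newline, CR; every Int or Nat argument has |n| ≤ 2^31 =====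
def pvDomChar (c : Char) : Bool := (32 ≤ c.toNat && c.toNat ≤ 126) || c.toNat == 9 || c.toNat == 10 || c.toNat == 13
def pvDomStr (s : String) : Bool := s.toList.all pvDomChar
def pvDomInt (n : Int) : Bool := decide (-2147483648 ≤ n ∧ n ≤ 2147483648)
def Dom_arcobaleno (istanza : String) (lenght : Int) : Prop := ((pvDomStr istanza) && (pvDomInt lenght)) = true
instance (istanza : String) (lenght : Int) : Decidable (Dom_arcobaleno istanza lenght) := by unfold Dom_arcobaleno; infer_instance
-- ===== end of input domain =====

-- B replaces A's slice-and-rescan recursion by an index-based recursion over (lo,hi)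
-- bounds driven by a next-same-character array built in one right-to-left pass (faster).


-- ===== PORT A =====
-- the 'while index < lenght' scan: some index = first index with colore == istanza[index];
-- none = loop exhausted, or istanza[index] out of range (there the Python raises — outside Pre_)
def arcLoop (s : List Char) (colore : Char) (lenght index : Int) : Option Int :=
  if index < lenght then
    match PySem.List.pyGet? s index with
    | none => none
    | some c => if colore == c then some index else arcLoop s colore lenght (index + 1)
  else none
termination_by (lenght - index).toNat
decreasing_by omega

-- a successful scan never returns an index below its start (needed for arcAux's termination)
theorem arcLoop_some_ge (s : List Char) (colore : Char) (lenght : Int) (index j : Int)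
    (h : arcLoop s colore lenght index = some j) : index ≤ j := by
  have H : ∀ (m : Nat) (index j : Int), (lenght - index).toNat = m →
      arcLoop s colore lenght index = some j → index ≤ j := by
    intro m
    induction m using Nat.strong_induction_on with
    | _ m ih =>
      intro index j hm h
      rw [arcLoop] at h
      split_ifs at h with hlt
      · rcases hg : PySem.List.pyGet? s index with _ | c <;> rw [hg] at h <;> dsimp only at h
        · simp at h
        · split_ifs at h with hb
          · simp only [Option.some.injEq] at h
            omega
          · have := ih (lenght - (index + 1)).toNat (by omega) (index + 1) j rfl h
            omega
  exact H (lenght - index).toNat index j rfl h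

def arcAux (s : List Char) (lenght : Int) : Int :=
  if s.length = 0 then 0
  else if s.length = 1 then 1
  else
    let colore := PySem.List.pyGetD s 0 ' '   -- istanza[0]; exact: s is nonempty here
    match _h : arcLoop s colore lenght 1 with
    | some index =>
        1 + arcAux (PySem.List.slice s (some 1) (some index))
              ((PySem.List.slice s (some 1) (some index)).length : Int)
          + arcAux (PySem.List.slice s (some index) none)
              ((PySem.List.slice s (some index) none).length : Int)
          - 1
    | none =>
        1 + arcAux (PySem.List.slice s (some 1) none)
              ((PySem.List.slice s (some 1) none).length : Int)
termination_by s.length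
decreasing_by
  · have h1 : (1 : Int) ≤ index := arcLoop_some_ge _ _ _ _ _ _h
    have e := PySem.List.slice_toNat s (a := 1) (b := index) (by omega) (by omega)
    rw [e]
    simp only [List.length_take, List.length_drop]
    omega
  · have h1 : (1 : Int) ≤ index := arcLoop_some_ge _ _ _ _ _ _h
    have e := PySem.List.slice_from s (a := index) (by omega)
    rw [e]
    simp only [List.length_drop]
    omega
  · rw [PySem.List.slice_from_one s]
    simp only [List.length_tail]
    omega

def arcobaleno (istanza : String) (lenght : Int) : Int :=
  arcAux istanza.toList lenght

-- ===== PORT B =====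
-- one step of the right-to-left pass: nxt.append(last.get(c)); last[c] = j
def nxtStep (s : List Char) (acc : List (Option Int) × PySem.Dict Char Int) (j : Int) :
    List (Option Int) × PySem.Dict Char Int :=
  match PySem.List.pyGet? s j with
  | none => acc   -- unreachable: j ranges over n-1 .. 0
  | some c => (acc.1 ++ [PySem.Dict.get? acc.2 c], PySem.Dict.insert acc.2 c j)

-- for j in range(n-1, -1, -1): ... ; nxt.reverse()
def buildNxt (s : List Char) : List (Option Int) :=
  (((PySem.List.pyRange ((s.length : Int) - 1) (-1) (-1)).foldl (nxtStep s)
      ([], PySem.Dict.empty)).1).reverse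

-- def h(lo, hi): the recursion on the segment istanza[lo:hi], no slicing
def hAux (nxt : List (Option Int)) (lo hi : Int) : Int :=
  if hi - lo ≤ 0 then 0
  else if hi - lo = 1 then 1
  else
    match PySem.List.pyGet? nxt lo with
    | some (some j) =>
        if _h : lo < j ∧ j < hi then hAux nxt (lo + 1) j + hAux nxt j hi
        else 1 + hAux nxt (lo + 1) hi
    | _ => 1 + hAux nxt (lo + 1) hi
termination_by (hi - lo).toNat
decreasing_by all_goals omega

def arcobaleno_alt (istanza : String) (lenght : Int) : Int :=
  let s := istanza.toList
  let n := s.length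
  if n = 0 then 0
  else if n = 1 then 1
  else
    let nxt := buildNxt s
    match PySem.List.pyGet? nxt 0 with
    | some (some j) =>
        if 0 < j ∧ j < lenght then hAux nxt 1 j + hAux nxt j (n : Int)
        else 1 + hAux nxt 1 (n : Int)
    | _ => 1 + hAux nxt 1 (n : Int)

-- ===== PRECONDITION & SPEC =====
-- Pre_ excludes exactly the inputs where A raises IndexError: len >= 2, lenght past the end
-- of the string and the first character never recurring, so the while-scan runs out of range.
def Pre_arcobaleno (istanza : String) (lenght : Int) : Prop :=
  istanza.toList.length ≤ 1 ∨ lenght ≤ (istanza.toList.length : Int) ∨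
    istanza.toList.headD ' ' ∈ istanza.toList.tail
instance (istanza : String) (lenght : Int) : Decidable (Pre_arcobaleno istanza lenght) := by
  unfold Pre_arcobaleno; infer_instance

def pvWitness_arcobaleno : String × Int := ("ab", 2)

def Spec_arcobaleno (istanza : String) (lenght : Int) (out : Int) : Prop :=
  out = arcobaleno_alt istanza lenght
instance (istanza : String) (lenght : Int) (out : Int) : Decidable (Spec_arcobaleno istanza lenght out) := by
  unfold Spec_arcobaleno; infer_instance

-- ===== CLAIM (what is proved, stated in full; the proofs are below) =====
def Claim_equal_arcobaleno : Prop := ∀ (istanza : String) (lenght : Int),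
  Dom_arcobaleno istanza lenght → Pre_arcobaleno istanza lenght →
    Spec_arcobaleno istanza lenght (arcobaleno istanza lenght)

-- ===== LEMMAS AND PROOFS =====

-- first index k ≥ t with s[k] = c, as an Option Int (specification of the nxt array)
def firstFrom (s : List Char) (t : Nat) (c : Char) : Option Int :=
  if h : t < s.length then
    (if s[t] = c then some (t : Int) else firstFrom s (t + 1) c)
  else none
termination_by s.length - t

theorem firstFrom_some (s : List Char) (t : Nat) (c : Char) (j : Int)
    (h : firstFrom s t c = some j) :
    (t : Int) ≤ j ∧ j < s.length ∧ s.getD j.toNat ' ' = c := by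
  have H : ∀ (m t : Nat) (j : Int), s.length - t = m → firstFrom s t c = some j →
      (t : Int) ≤ j ∧ j < s.length ∧ s.getD j.toNat ' ' = c := by
    intro m
    induction m using Nat.strong_induction_on with
    | _ m ih =>
      intro t j hm h
      rw [firstFrom] at h
      split_ifs at h with ht hc
      · simp only [Option.some.injEq] at h
        refine ⟨by omega, by rw [← h]; exact_mod_cast ht, ?_⟩
        rw [← h, ← hc]
        simp [List.getD_eq_getElem?_getD, List.getElem?_eq_getElem ht]
      · have := ih (s.length - (t + 1)) (by omega) (t + 1) j rfl h
        refine ⟨by push_cast at this ⊢; omega, this.2.1, this.2.2⟩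
  exact H (s.length - t) t j rfl h

theorem firstFrom_none_iff (s : List Char) (t : Nat) (c : Char) :
    firstFrom s t c = none ↔ c ∉ s.drop t := by
  have H : ∀ (m t : Nat), s.length - t = m → (firstFrom s t c = none ↔ c ∉ s.drop t) := by
    intro m
    induction m using Nat.strong_induction_on with
    | _ m ih =>
      intro t hm
      rw [firstFrom]
      split_ifs with ht hc
      · rw [List.drop_eq_getElem_cons ht]
        simp [hc]
      · rw [List.drop_eq_getElem_cons ht]
        rw [ih (s.length - (t + 1)) (by omega) (t + 1) rfl]
        simp only [List.mem_cons, not_or]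
        constructor
        · intro hn
          exact ⟨fun hh => hc hh.symm, hn⟩
        · intro hn
          exact hn.2
      · rw [List.drop_of_length_le (by omega)]
        simp
  exact H (s.length - t) t rfl

theorem arcLoop_eq_some (s : List Char) (c : Char) (L : Int) (i : Nat) (j : Int)
    (hj : firstFrom s i c = some j) (hjL : j < L) :
    arcLoop s c L (i : Int) = some j := by
  have H : ∀ (m i : Nat) (j : Int), s.length - i = m → firstFrom s i c = some j → j < L →
      arcLoop s c L (i : Int) = some j := by
    intro m
    induction m using Nat.strong_induction_on with
    | _ m ih =>
      intro i j hm hj hjL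
      obtain ⟨hij, hjlen, -⟩ := firstFrom_some s i c j hj
      have hilen : i < s.length := by omega
      rw [arcLoop, if_pos (by omega), PySem.List.pyGet?_natCast,
        List.getElem?_eq_getElem hilen]
      rw [firstFrom, dif_pos hilen] at hj
      by_cases hc : s[i] = c
      · rw [if_pos hc] at hj
        simp only [Option.some.injEq] at hj
        simp [hc, ← hj]
      · rw [if_neg hc] at hj
        have hbeq : (c == s[i]) = false := by
          simp only [beq_eq_false_iff_ne, ne_eq]
          exact fun hh => hc hh.symm
        simp only [hbeq, Bool.false_eq_true, if_false]
        have := ih (s.length - (i + 1)) (by omega) (i + 1) j rfl hj hjL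
        push_cast at this ⊢
        exact this
  exact H (s.length - i) i j rfl hj hjL

theorem arcLoop_eq_none (s : List Char) (c : Char) (L : Int) (i : Nat)
    (hL : L ≤ (s.length : Int))
    (h : firstFrom s i c = none ∨ ∃ j, firstFrom s i c = some j ∧ L ≤ j) :
    arcLoop s c L (i : Int) = none := by
  have H : ∀ (m i : Nat), (L - (i : Int)).toNat = m →
      (firstFrom s i c = none ∨ ∃ j, firstFrom s i c = some j ∧ L ≤ j) →
      arcLoop s c L (i : Int) = none := by
    intro m
    induction m using Nat.strong_induction_on with
    | _ m ih =>
      intro i hm h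
      rw [arcLoop]
      split_ifs with hlt
      · have hilen : i < s.length := by omega
        rw [PySem.List.pyGet?_natCast, List.getElem?_eq_getElem hilen]
        by_cases hc : s[i] = c
        · exfalso
          have hfi : firstFrom s i c = some (i : Int) := by
            rw [firstFrom, dif_pos hilen, if_pos hc]
          rcases h with h | ⟨j, hj, hLj⟩
          · rw [hfi] at h; exact absurd h (by simp)
          · rw [hfi] at hj
            simp only [Option.some.injEq] at hj
            omega
        · have hbeq : (c == s[i]) = false := by
            simp only [beq_eq_false_iff_ne, ne_eq]
            exact fun hh => hc hh.symm
          simp only [hbeq, Bool.false_eq_true, if_false]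
          have hstep : firstFrom s i c = firstFrom s (i + 1) c := by
            rw [firstFrom, dif_pos hilen, if_neg hc]
          rw [hstep] at h
          have := ih (L - ((i : Int) + 1)).toNat (by omega) (i + 1) (by push_cast; omega) h
          push_cast at this ⊢
          exact this
      · rfl
  exact H (L - (i : Int)).toNat i rfl h

theorem buildNxt_inv (s : List Char) : ∀ (t : Nat), t ≤ s.length →
    ∀ (acc : List (Option Int)) (d : PySem.Dict Char Int),
      (∀ c, PySem.Dict.get? d c = firstFrom s t c) →
      ((PySem.List.pyRange ((t : Int) - 1) (-1) (-1)).foldl (nxtStep s) (acc, d)).1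
        = acc ++ (List.range t).reverse.map (fun j => firstFrom s (j + 1) (s.getD j ' ')) := by
  intro t
  induction t with
  | zero =>
    intro _ acc d _
    rw [PySem.List.pyRange_neg_one_eq_nil (by omega)]
    simp
  | succ t ih =>
    intro ht acc d hd
    have hcast : ((t + 1 : Nat) : Int) - 1 = (t : Int) := by push_cast; ring
    rw [hcast, PySem.List.pyRange_neg_one_cons (by omega), List.foldl_cons]
    have htlen : t < s.length := by omega
    have hstep : nxtStep s (acc, d) (t : Int)
        = (acc ++ [firstFrom s (t + 1) (s.getD t ' ')], PySem.Dict.insert d s[t] (t : Int)) := by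
      rw [nxtStep, PySem.List.pyGet?_natCast, List.getElem?_eq_getElem htlen]
      dsimp only
      rw [hd s[t]]
      have : s.getD t ' ' = s[t] := List.getD_eq_getElem s ' ' htlen
      rw [this]
    rw [hstep]
    rw [ih (by omega) (acc ++ [firstFrom s (t + 1) (s.getD t ' ')]) (PySem.Dict.insert d s[t] (t : Int)) ?_]
    · rw [List.range_succ]
      simp [List.map_append]
    · intro c
      rw [PySem.Dict.get?_insert]
      rw [firstFrom, dif_pos htlen]
      by_cases hc : c = s[t]
      · rw [if_pos hc, if_pos hc.symm]
      · rw [if_neg hc, if_neg (fun hh => hc hh.symm), hd c]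

theorem buildNxt_eq (s : List Char) :
    buildNxt s = (List.range s.length).map (fun j => firstFrom s (j + 1) (s.getD j ' ')) := by
  rw [buildNxt]
  rw [buildNxt_inv s s.length le_rfl [] PySem.Dict.empty
    (fun c => by rw [PySem.Dict.get?_empty, firstFrom, dif_neg (by omega)])]
  simp [List.map_reverse]

theorem buildNxt_get (s : List Char) (lo : Nat) (h : lo < s.length) :
    PySem.List.pyGet? (buildNxt s) (lo : Int) = some (firstFrom s (lo + 1) (s.getD lo ' ')) := by
  rw [buildNxt_eq, PySem.List.pyGet?_natCast]
  simp [List.getElem?_map, List.getElem?_range h]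

-- the next-occurrence search restricted to the window s[lo:hi]
theorem firstFrom_window (s : List Char) (lo hi k : Nat) (c : Char)
    (hk : lo + k ≤ hi) (hhi : hi ≤ s.length) :
    firstFrom ((s.drop lo).take (hi - lo)) k c
      = match firstFrom s (lo + k) c with
        | some j => if j < (hi : Int) then some (j - lo) else none
        | none => none := by
  have H : ∀ (m k : Nat), hi - (lo + k) = m → lo + k ≤ hi →
      firstFrom ((s.drop lo).take (hi - lo)) k c
        = match firstFrom s (lo + k) c with
          | some j => if j < (hi : Int) then some (j - lo) else none
          | none => none := by
    intro m
    induction m using Nat.strong_induction_on with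
    | _ m ih =>
      intro k hm hk'
      have hlen : ((s.drop lo).take (hi - lo)).length = hi - lo := by
        simp only [List.length_take, List.length_drop]
        omega
      rw [firstFrom]
      by_cases hkw : k < hi - lo
      · have hkl : lo + k < s.length := by omega
        rw [dif_pos (by omega : k < ((s.drop lo).take (hi - lo)).length)]
        simp only [List.getElem_take, List.getElem_drop]
        rw [show firstFrom s (lo + k) c
              = if s[lo + k] = c then some ((lo + k : Nat) : Int) else firstFrom s (lo + k + 1) c
            from by rw [firstFrom, dif_pos hkl]]
        by_cases hc : s[lo + k] = c
        · rw [if_pos hc, if_pos hc]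
          dsimp only
          rw [if_pos (by push_cast; omega : ((lo + k : Nat) : Int) < (hi : Int))]
          congr 1
          push_cast
          ring
        · rw [if_neg hc, if_neg hc]
          exact ih (hi - (lo + (k + 1))) (by omega) (k + 1) rfl (by omega)
      · rw [dif_neg (by omega)]
        have he : lo + k = hi := by omega
        rw [he]
        cases hf : firstFrom s hi c with
        | none => rfl
        | some j =>
          obtain ⟨hj1, -, -⟩ := firstFrom_some s hi c j hf
          dsimp only
          rw [if_neg (by omega)]
  exact H (hi - (lo + k)) k rfl hk

-- main invariant: hAux on window bounds computes arcAux on the extracted window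
theorem hAux_eq_arcAux (s : List Char) : ∀ (d lo hi : Nat), hi - lo = d → hi ≤ s.length →
    hAux (buildNxt s) (lo : Int) (hi : Int)
      = arcAux ((s.drop lo).take (hi - lo)) ((hi : Int) - (lo : Int)) := by
  intro d
  induction d using Nat.strong_induction_on with
  | _ d ih =>
    intro lo hi hd hhi
    by_cases h0 : hi ≤ lo
    · rw [show hi - lo = 0 from by omega]
      rw [hAux, if_pos (by omega : (hi : Int) - (lo : Int) ≤ 0)]
      rw [arcAux]
      simp
    · by_cases h1 : hi = lo + 1
      · subst h1
        rw [hAux, if_neg (by omega), if_pos (by push_cast; omega)]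
        rw [arcAux]
        have hlen1 : ((s.drop lo).take (lo + 1 - lo)).length = 1 := by
          simp only [List.length_take, List.length_drop]
          omega
        simp only [hlen1]
        norm_num
      · -- main case: window of length ≥ 2
        have h2 : lo + 2 ≤ hi := by omega
        have hlolen : lo < s.length := by omega
        have hlen : ((s.drop lo).take (hi - lo)).length = hi - lo := by
          simp only [List.length_take, List.length_drop]
          omega
        have htail : ((s.drop lo).take (hi - lo)).tail = (s.drop (lo + 1)).take (hi - (lo + 1)) := by
          rw [← List.drop_one, List.drop_take, List.drop_drop]
          congr 1
        rw [hAux, if_neg (by omega), if_neg (by omega), buildNxt_get s lo hlolen]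
        rw [arcAux, if_neg (by rw [hlen]; omega), if_neg (by rw [hlen]; omega)]
        have hcol : PySem.List.pyGetD ((s.drop lo).take (hi - lo)) 0 ' ' = s.getD lo ' ' := by
          rw [PySem.List.pyGetD_zero]
          rw [List.getD_eq_getElem _ _ (by omega : 0 < ((s.drop lo).take (hi - lo)).length),
            List.getD_eq_getElem _ _ hlolen]
          simp [List.getElem_take, List.getElem_drop]
        have hLt : (hi : Int) - (lo : Int) ≤ (((s.drop lo).take (hi - lo)).length : Int) := by
          rw [hlen]; push_cast; omega
        have hnomatch : arcAux (PySem.List.slice ((s.drop lo).take (hi - lo)) (some 1))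
            ((PySem.List.slice ((s.drop lo).take (hi - lo)) (some 1)).length : Int)
            = hAux (buildNxt s) ((lo : Int) + 1) (hi : Int) := by
          rw [PySem.List.slice_from_one, htail]
          have hih := ih (hi - (lo + 1)) (by omega) (lo + 1) hi rfl hhi
          push_cast at hih
          have hl2 : (((s.drop (lo + 1)).take (hi - (lo + 1))).length : Int)
              = (hi : Int) - ((lo : Int) + 1) := by
            simp only [List.length_take, List.length_drop]
            omega
          rw [hl2, hih]
        cases hf : firstFrom s (lo + 1) (s.getD lo ' ') with
        | none =>
          have hwin := firstFrom_window s lo hi 1 (s.getD lo ' ') (by omega) hhi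
          rw [hf] at hwin
          dsimp only at hwin
          have hloop := arcLoop_eq_none ((s.drop lo).take (hi - lo)) (s.getD lo ' ')
            ((hi : Int) - (lo : Int)) 1 hLt (Or.inl hwin)
          rw [Nat.cast_one] at hloop
          rw [← hcol] at hloop
          dsimp only
          split
          · next index heq => rw [hloop] at heq; exact absurd heq (by simp)
          · next heq => rw [hnomatch]
        | some j =>
          obtain ⟨hj1, hj2, hj3⟩ := firstFrom_some s (lo + 1) (s.getD lo ' ') j hf
          obtain ⟨jn, rfl⟩ : ∃ jn : Nat, j = (jn : Int) :=
            ⟨j.toNat, by push_cast at hj1; omega⟩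
          push_cast at hj1
          have hwin := firstFrom_window s lo hi 1 (s.getD lo ' ') (by omega) hhi
          rw [hf] at hwin
          dsimp only at hwin
          by_cases hjh : (jn : Int) < (hi : Int)
          · -- the scan finds a match inside the window
            rw [if_pos hjh] at hwin
            have hloop := arcLoop_eq_some ((s.drop lo).take (hi - lo)) (s.getD lo ' ')
              ((hi : Int) - (lo : Int)) 1 ((jn : Int) - (lo : Int)) hwin (by omega)
            rw [Nat.cast_one] at hloop
            rw [← hcol] at hloop
            dsimp only
            rw [dif_pos (by constructor <;> omega : (lo : Int) < (jn : Int) ∧ (jn : Int) < (hi : Int))]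
            split
            · next index heq =>
                rw [hloop] at heq
                simp only [Option.some.injEq] at heq
                subst heq
                have hslice1 : PySem.List.slice ((s.drop lo).take (hi - lo)) (some 1)
                    (some ((jn : Int) - (lo : Int))) = (s.drop (lo + 1)).take (jn - (lo + 1)) := by
                  rw [PySem.List.slice_toNat _ (by omega) (by omega)]
                  simp only [List.drop_take, List.drop_drop, List.take_take]
                  congr 1 <;> first | omega | (congr 1 <;> omega)
                have hslice2 : PySem.List.slice ((s.drop lo).take (hi - lo))
                    (some ((jn : Int) - (lo : Int))) = (s.drop jn).take (hi - jn) := by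
                  rw [PySem.List.slice_from _ (by omega)]
                  simp only [List.drop_take, List.drop_drop]
                  congr 1 <;> first | omega | (congr 1 <;> omega)
                rw [hslice1, hslice2]
                have ih1 := ih (jn - (lo + 1)) (by omega) (lo + 1) jn rfl (by omega)
                have ih2 := ih (hi - jn) (by omega) jn hi rfl hhi
                push_cast at ih1 ih2
                have hl1 : (((s.drop (lo + 1)).take (jn - (lo + 1))).length : Int)
                    = (jn : Int) - ((lo : Int) + 1) := by
                  simp only [List.length_take, List.length_drop]
                  omega
                have hl2 : (((s.drop jn).take (hi - jn)).length : Int)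
                    = (hi : Int) - (jn : Int) := by
                  simp only [List.length_take, List.length_drop]
                  omega
                rw [hl1, hl2, ← ih1, ← ih2]
                ring
            · next heq => rw [hloop] at heq; exact absurd heq (by simp)
          · -- the next occurrence lies past the window: no match inside it
            rw [if_neg hjh] at hwin
            have hloop := arcLoop_eq_none ((s.drop lo).take (hi - lo)) (s.getD lo ' ')
              ((hi : Int) - (lo : Int)) 1 hLt (Or.inl hwin)
            rw [Nat.cast_one] at hloop
            rw [← hcol] at hloop
            dsimp only
            rw [dif_neg (fun hh => hjh hh.2)]
            split
            · next index heq => rw [hloop] at heq; exact absurd heq (by simp)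
            · next heq => rw [hnomatch]

-- ===== VERDICT (by name: the statement is the Claim_ definition above) =====
theorem arcobaleno_spec : Claim_equal_arcobaleno := by
  unfold Claim_equal_arcobaleno
  intro istanza lenght _ hpre
  unfold Spec_arcobaleno
  unfold Pre_arcobaleno at hpre
  rw [arcobaleno, arcobaleno_alt]
  set s := istanza.toList with hs
  dsimp only
  by_cases hn0 : s.length = 0
  · rw [if_pos hn0, arcAux, if_pos hn0]
  · by_cases hn1 : s.length = 1
    · rw [if_neg hn0, if_pos hn1, arcAux, if_neg hn0, if_pos hn1]
    · -- length ≥ 2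
      rw [if_neg hn0, if_neg hn1, arcAux, if_neg hn0, if_neg hn1]
      have hg := buildNxt_get s 0 (by omega)
      norm_num at hg
      have hg' : PySem.List.pyGet? (buildNxt s) 0 = some (firstFrom s 1 (s.getD 0 ' ')) := hg
      rw [hg']
      have hcol : PySem.List.pyGetD s 0 ' ' = s.getD 0 ' ' := PySem.List.pyGetD_zero s ' '
      have tailEq : arcAux (PySem.List.slice s (some 1))
          ((PySem.List.slice s (some 1)).length : Int)
          = hAux (buildNxt s) 1 (s.length : Int) := by
        rw [PySem.List.slice_from_one]
        have m := hAux_eq_arcAux s (s.length - 1) 1 s.length rfl le_rfl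
        push_cast at m
        have ht : s.tail = (s.drop 1).take (s.length - 1) := by
          rw [← List.drop_one, List.take_of_length_le (by simp)]
        rw [ht]
        have hl : (((s.drop 1).take (s.length - 1)).length : Int) = (s.length : Int) - 1 := by
          simp only [List.length_take, List.length_drop]
          omega
        rw [hl, m]
      cases hf : firstFrom s 1 (s.getD 0 ' ') with
      | none =>
        have hLn : lenght ≤ (s.length : Int) := by
          rcases hpre with h | h | h
          · omega
          · exact h
          · exfalso
            have := (firstFrom_none_iff s 1 (s.getD 0 ' ')).mp hf
            rw [List.drop_one] at this
            exact this (by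
              have hh : s.headD ' ' = s.getD 0 ' ' := by cases s <;> rfl
              rw [← hh]
              exact h)
        have hloop := arcLoop_eq_none s (s.getD 0 ' ') lenght 1 hLn (Or.inl hf)
        rw [Nat.cast_one] at hloop
        rw [← hcol] at hloop
        dsimp only
        split
        · next index heq => rw [hloop] at heq; exact absurd heq (by simp)
        · next heq => rw [tailEq]
      | some j =>
        obtain ⟨hj1, hj2, hj3⟩ := firstFrom_some s 1 (s.getD 0 ' ') j hf
        obtain ⟨jn, rfl⟩ : ∃ jn : Nat, j = (jn : Int) := ⟨j.toNat, by omega⟩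
        push_cast at hj1 hj2
        dsimp only
        by_cases hjl : (jn : Int) < lenght
        · -- the scan finds the first recurrence before the bound
          rw [if_pos ⟨by omega, hjl⟩]
          have hloop := arcLoop_eq_some s (s.getD 0 ' ') lenght 1 (jn : Int) hf hjl
          rw [Nat.cast_one] at hloop
          rw [← hcol] at hloop
          split
          · next index heq =>
              rw [hloop] at heq
              simp only [Option.some.injEq] at heq
              subst heq
              have e1 : PySem.List.slice s (some 1) (some (jn : Int))
                  = (s.drop 1).take (jn - 1) := by
                rw [PySem.List.slice_toNat _ (by omega) (by omega)]
                congr 1 <;> first | omega | (congr 1 <;> omega)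
              have e2 : PySem.List.slice s (some (jn : Int))
                  = (s.drop jn).take (s.length - jn) := by
                rw [PySem.List.slice_from _ (by omega)]
                rw [List.take_of_length_le (by simp)]
                simp
              rw [e1, e2]
              have m1 := hAux_eq_arcAux s (jn - 1) 1 jn rfl (by omega)
              have m2 := hAux_eq_arcAux s (s.length - jn) jn s.length rfl le_rfl
              push_cast at m1 m2
              have hl1 : (((s.drop 1).take (jn - 1)).length : Int) = (jn : Int) - 1 := by
                simp only [List.length_take, List.length_drop]
                omega
              have hl2 : (((s.drop jn).take (s.length - jn)).length : Int)
                  = (s.length : Int) - (jn : Int) := by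
                simp only [List.length_take, List.length_drop]
                omega
              rw [hl1, hl2, ← m1, ← m2]
              ring
          · next heq => rw [hloop] at heq; exact absurd heq (by simp)
        · -- the first recurrence lies at or past the bound: the scan exhausts it
          rw [if_neg (fun hh => hjl hh.2)]
          have hLn : lenght ≤ (s.length : Int) := by omega
          have hloop := arcLoop_eq_none s (s.getD 0 ' ') lenght 1 hLn
            (Or.inr ⟨(jn : Int), hf, by omega⟩)
          rw [Nat.cast_one] at hloop
          rw [← hcol] at hloop
          split
          · next index heq => rw [hloop] at heq; exact absurd heq (by simp)
          · next heq => rw [tailEq]
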